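-- pv_equiv track=rewrite | github.com/alderban107/hypixel-skyblock | tools/sbxp.py | calc_hotm_sbxp
-- ===== SOURCE A (Python) =====
-- HOTM_XP_THRESHOLDS = [0, 3_000, 12_000, 37_000, 97_000, 197_000, 347_000, 557_000, 847_000, 1_247_000]
--
-- HOTM_TIER_XP = [35, 45, 60, 75, 90, 110, 130, 180, 210, 240]
--
-- def calc_hotm_sbxp(member):
--     """Calculate SBXP from HotM tiers (not including powder or PotM)."""
--     hotm_xp = member.get("skill_tree", {}).get("experience", {}).get("mining", 0)
--
--     # Calculate HotM level
--     level = 1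
--     for i, threshold in enumerate(HOTM_XP_THRESHOLDS):
--         if i + 1 > 10:
--             break
--         if hotm_xp >= threshold:
--             level = i + 1
--
--     sbxp = sum(HOTM_TIER_XP[:level])
--     return sbxp, sum(HOTM_TIER_XP), {"level": level, "xp": hotm_xp}
-- ===== SOURCE B (Python) =====
-- HOTM_XP_THRESHOLDS = [0, 3_000, 12_000, 37_000, 97_000, 197_000, 347_000, 557_000, 847_000, 1_247_000]
--
-- HOTM_TIER_XP = [35, 45, 60, 75, 90, 110, 130, 180, 210, 240]
--
-- # Cumulative tier XP: CUM_TIER_XP[k] == sum(HOTM_TIER_XP[:k])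
-- CUM_TIER_XP = [0]
-- for _t in HOTM_TIER_XP:
--     CUM_TIER_XP.append(CUM_TIER_XP[-1] + _t)
--
--
-- def calc_hotm_sbxp(member):
--     """Calculate SBXP from HotM tiers (not including powder or PotM)."""
--     hotm_xp = member.get("skill_tree", {}).get("experience", {}).get("mining", 0)
--
--     # Binary search: lo ends as the number of thresholds <= hotm_xp
--     lo, hi = 0, len(HOTM_XP_THRESHOLDS)
--     while lo < hi:
--         mid = (lo + hi) // 2
--         if HOTM_XP_THRESHOLDS[mid] <= hotm_xp:
--             lo = mid + 1
--         else:
--             hi = mid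
--     level = lo if lo > 0 else 1
--
--     return CUM_TIER_XP[level], CUM_TIER_XP[10], {"level": level, "xp": hotm_xp}
-- ===== Notes on version B (the rewrite author's own statement) =====
-- stated objective: alternative
-- what changed: Replaced A's linear enumerate-scan over the thresholds and per-call slice-and-sum of tier XP with a hand-written binary search over the sorted thresholds plus a precomputed cumulative-XP table indexed by level.
import Mathlib
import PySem

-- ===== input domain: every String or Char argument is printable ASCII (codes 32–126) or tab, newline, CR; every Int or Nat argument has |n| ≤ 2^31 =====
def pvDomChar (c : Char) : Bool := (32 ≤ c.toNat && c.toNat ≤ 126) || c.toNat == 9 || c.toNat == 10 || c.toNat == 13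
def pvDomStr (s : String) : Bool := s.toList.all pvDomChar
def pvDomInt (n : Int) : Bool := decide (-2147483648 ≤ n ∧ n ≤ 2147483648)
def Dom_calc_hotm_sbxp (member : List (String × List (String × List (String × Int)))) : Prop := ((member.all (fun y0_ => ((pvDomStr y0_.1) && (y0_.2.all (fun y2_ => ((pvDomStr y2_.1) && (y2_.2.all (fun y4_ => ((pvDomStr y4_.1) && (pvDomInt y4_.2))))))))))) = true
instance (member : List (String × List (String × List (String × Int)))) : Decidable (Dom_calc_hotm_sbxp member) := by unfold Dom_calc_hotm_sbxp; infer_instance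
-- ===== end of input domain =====

-- B replaces A's linear threshold scan + slice-sum with a binary search over the
-- sorted thresholds and a precomputed cumulative-XP table (objective: alternative).

-- ===== PORT A =====
def HOTM_XP_THRESHOLDS : List Int := [0, 3000, 12000, 37000, 97000, 197000, 347000, 557000, 847000, 1247000]

def HOTM_TIER_XP : List Int := [35, 45, 60, 75, 90, 110, 130, 180, 210, 240]

-- the 'for i, threshold in enumerate(...)' loop with its 'break' (which never fires for i ≤ 9)
def hotmLevelLoop (hotm_xp : Int) (level : Int) : List (Int × Int) → Int
  | [] => level
  | (i, threshold) :: rest =>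
      if i + 1 > 10 then level
      else hotmLevelLoop hotm_xp (if hotm_xp ≥ threshold then i + 1 else level) rest

def calc_hotm_sbxp (member : List (String × List (String × List (String × Int)))) : Int × Int × (List (String × Int)) :=
  let hotm_xp := PySem.Dict.getD (PySem.Dict.mk (PySem.Dict.getD (PySem.Dict.mk (PySem.Dict.getD (PySem.Dict.mk member) "skill_tree" [])) "experience" [])) "mining" 0
  let level := hotmLevelLoop hotm_xp 1 (PySem.List.enumerate HOTM_XP_THRESHOLDS)
  let sbxp := (PySem.List.slice HOTM_TIER_XP none (some level)).sum
  (sbxp, HOTM_TIER_XP.sum, [("level", level), ("xp", hotm_xp)])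

-- ===== PORT B =====
-- CUM_TIER_XP built by the module-level loop in Source B
def CUM_TIER_XP : List Int := HOTM_TIER_XP.foldl (fun acc t => acc ++ [acc.getLast! + t]) [0]

-- the 'while lo < hi' binary search of Source B
def bsearchLoop (hotm_xp : Int) (lo hi : Nat) : Nat :=
  if lo < hi then
    let mid := (lo + hi) / 2
    if HOTM_XP_THRESHOLDS.getD mid 0 ≤ hotm_xp then bsearchLoop hotm_xp (mid + 1) hi
    else bsearchLoop hotm_xp lo mid
  else lo
termination_by hi - lo
decreasing_by all_goals omega

def calc_hotm_sbxp_alt (member : List (String × List (String × List (String × Int)))) : Int × Int × (List (String × Int)) :=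
  let hotm_xp := PySem.Dict.getD (PySem.Dict.mk (PySem.Dict.getD (PySem.Dict.mk (PySem.Dict.getD (PySem.Dict.mk member) "skill_tree" [])) "experience" [])) "mining" 0
  let lo := bsearchLoop hotm_xp 0 HOTM_XP_THRESHOLDS.length
  let level : Nat := if lo > 0 then lo else 1
  (CUM_TIER_XP.getD level 0, CUM_TIER_XP.getD 10 0, [("level", (level : Int)), ("xp", hotm_xp)])

-- ===== PRECONDITION & SPEC =====
def Spec_calc_hotm_sbxp (member : List (String × List (String × List (String × Int)))) (out : Int × Int × (List (String × Int))) : Prop := out = calc_hotm_sbxp_alt member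
instance (member : List (String × List (String × List (String × Int)))) (out : Int × Int × (List (String × Int))) : Decidable (Spec_calc_hotm_sbxp member out) := by unfold Spec_calc_hotm_sbxp; infer_instance

-- ===== CLAIM (what is proved, stated in full; the proofs are below) =====
def Claim_equal_calc_hotm_sbxp : Prop := ∀ (member : List (String × List (String × List (String × Int)))), Dom_calc_hotm_sbxp member → Spec_calc_hotm_sbxp member (calc_hotm_sbxp member)

-- ===== LEMMAS AND PROOFS =====

-- both results depend only on hotm_xp; compare them as functions of xp
set_option maxHeartbeats 4000000 in
theorem bodies_eq (xp : Int) :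
    ((PySem.List.slice HOTM_TIER_XP none (some (hotmLevelLoop xp 1 (PySem.List.enumerate HOTM_XP_THRESHOLDS)))).sum,
      HOTM_TIER_XP.sum,
      [("level", hotmLevelLoop xp 1 (PySem.List.enumerate HOTM_XP_THRESHOLDS)), ("xp", xp)])
    = (CUM_TIER_XP.getD (if bsearchLoop xp 0 HOTM_XP_THRESHOLDS.length > 0 then bsearchLoop xp 0 HOTM_XP_THRESHOLDS.length else 1) 0,
       CUM_TIER_XP.getD 10 0,
       [("level", ((if bsearchLoop xp 0 HOTM_XP_THRESHOLDS.length > 0 then bsearchLoop xp 0 HOTM_XP_THRESHOLDS.length else 1 : Nat) : Int)), ("xp", xp)]) := by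
  simp [HOTM_XP_THRESHOLDS, HOTM_TIER_XP, CUM_TIER_XP, hotmLevelLoop, bsearchLoop,
    PySem.List.enumerate, PySem.List.slice]
  split_ifs <;> simp_all <;> omega

theorem calc_hotm_sbxp_spec : Claim_equal_calc_hotm_sbxp := by
  intro member _
  show calc_hotm_sbxp member = calc_hotm_sbxp_alt member
  unfold calc_hotm_sbxp calc_hotm_sbxp_alt
  exact bodies_eq _
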